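-- pv_equiv track=rewrite | github.com/GGN-2015/arknights_museum_navigator | src/recognize.py | del_conti
-- ===== SOURCE A (Python) =====
-- def del_conti(arr_set:list) -> list:
--     assert len(arr_set) > 0
--     new_arr = [arr_set[0]]
--     for i in range(1, len(arr_set)):
--         if abs(arr_set[i] - new_arr[-1]) >= 4:
--             new_arr.append(arr_set[i])
--         else:
--             new_arr[-1] = arr_set[i]
--     return new_arr
-- ===== SOURCE B (Python) =====
-- def del_conti(arr_set: list) -> list:
--     assert len(arr_set) > 0
--     return [x for x, y in zip(arr_set, arr_set[1:]) if abs(y - x) >= 4] + [arr_set[-1]]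
-- ===== Notes on version B (the rewrite author's own statement) =====
-- stated objective: idiomatic
-- what changed: A walks forward mutating the result list (append or overwrite its last slot against a running reference); B is a single zip/filter comprehension that keeps each element whose successor is >= 4 away, plus the last element, with no mutation or overwriting.
import Mathlib
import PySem

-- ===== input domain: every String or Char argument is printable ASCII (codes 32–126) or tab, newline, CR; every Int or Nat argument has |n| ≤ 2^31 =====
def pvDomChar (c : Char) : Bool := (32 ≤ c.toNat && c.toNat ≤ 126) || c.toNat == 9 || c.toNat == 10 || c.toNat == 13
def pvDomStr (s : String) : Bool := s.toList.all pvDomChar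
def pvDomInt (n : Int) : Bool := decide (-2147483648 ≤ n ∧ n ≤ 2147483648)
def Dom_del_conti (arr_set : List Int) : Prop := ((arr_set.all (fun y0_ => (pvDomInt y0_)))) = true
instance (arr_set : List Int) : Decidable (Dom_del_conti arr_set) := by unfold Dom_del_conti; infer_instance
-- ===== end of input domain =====

-- B replaces A's backward-looking overwrite loop by a zip/filter comprehension keeping each
-- element whose successor is ≥ 4 away, plus the last element (objective: idiomatic, same cost).
-- Both programs assert the input is nonempty; Pre_ excludes the empty list.

-- ===== PORT A =====
-- A: new_arr = [arr_set[0]]; for i in range(1, len): append if |arr_set[i]-new_arr[-1]| >= 4 else overwrite last.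
def del_conti (arr_set : List Int) : List Int :=
  match arr_set with
  | [] => []   -- unreachable: the assert fails on the empty list (outside Pre_)
  | x :: _ =>
    (PySem.List.pyRange 1 (PySem.List.len arr_set) 1).foldl
      (fun new_arr i =>
        let ai := PySem.List.pyGetD arr_set i 0
        if 4 ≤ |ai - PySem.List.pyGetD new_arr (-1) 0| then
          new_arr ++ [ai]
        else
          new_arr.dropLast ++ [ai]) [x]

-- ===== PORT B =====
-- B: [x for x, y in zip(arr_set, arr_set[1:]) if abs(y - x) >= 4] + [arr_set[-1]]
def del_conti_alt (arr_set : List Int) : List Int :=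
  match arr_set with
  | [] => []   -- unreachable: the assert fails on the empty list (outside Pre_)
  | _ =>
    ((arr_set.zip (PySem.List.slice arr_set (some 1) none)).filter
        (fun p => decide (4 ≤ |p.2 - p.1|))).map Prod.fst
      ++ [PySem.List.pyGetD arr_set (-1) 0]

-- ===== PRECONDITION & SPEC =====
-- Pre_ excludes exactly the empty list, on which A's (and B's) assert raises AssertionError.
def Pre_del_conti (arr_set : List Int) : Prop := arr_set ≠ []
instance (arr_set : List Int) : Decidable (Pre_del_conti arr_set) := by unfold Pre_del_conti; infer_instance
def pvWitness_del_conti : List Int := [1, 2, 9, 10, 3]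

def Spec_del_conti (arr_set : List Int) (out : List Int) : Prop := out = del_conti_alt arr_set
instance (arr_set : List Int) (out : List Int) : Decidable (Spec_del_conti arr_set out) := by unfold Spec_del_conti; infer_instance

-- ===== CLAIM (what is proved, stated in full; the proofs are below) =====
def Claim_equal_del_conti : Prop := ∀ (arr_set : List Int), Dom_del_conti arr_set → Pre_del_conti arr_set → Spec_del_conti arr_set (del_conti arr_set)

-- ===== LEMMAS AND PROOFS =====

-- Reference run-collapsing recursion both ports are reduced to.
def pvRuns (prev : Int) : List Int → List Int
  | [] => [prev]
  | y :: rest => if 4 ≤ |y - prev| then prev :: pvRuns y rest else pvRuns y rest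

theorem pvLast_getD (acc : List Int) (p d : Int) :
    PySem.List.pyGetD (acc ++ [p]) (-1) d = p := by
  simp [PySem.List.pyGetD, PySem.List.pyGet?, PySem.List.pyIdx?]

theorem pvFoldA (rest : List Int) : ∀ (prev : Int) (acc : List Int),
    rest.foldl
      (fun new_arr ai =>
        if 4 ≤ |ai - PySem.List.pyGetD new_arr (-1) 0| then
          new_arr ++ [ai]
        else
          new_arr.dropLast ++ [ai]) (acc ++ [prev])
    = acc ++ pvRuns prev rest := by
  induction rest with
  | nil => intro prev acc; simp [pvRuns]
  | cons y rest ih =>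
    intro prev acc
    simp only [List.foldl_cons, pvLast_getD, pvRuns]
    by_cases h : 4 ≤ |y - prev|
    · rw [if_pos h, if_pos h, List.append_assoc, ← List.append_assoc acc [prev] [y]]
      have := ih y (acc ++ [prev])
      simpa using this
    · rw [if_neg h, if_neg h]
      have hd : (acc ++ [prev]).dropLast = acc := by simp
      rw [hd, ih y acc]

theorem pvA_eq (x : Int) (xs : List Int) : del_conti (x :: xs) = pvRuns x xs := by
  show (PySem.List.pyRange 1 (PySem.List.len (x :: xs)) 1).foldl _ [x] = _
  have h := PySem.List.foldl_pyRange_pyGetD (xs := x :: xs) (a := 1) (d := 0)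
      (f := fun new_arr ai =>
        if 4 ≤ |ai - PySem.List.pyGetD new_arr (-1) 0| then
          new_arr ++ [ai]
        else
          new_arr.dropLast ++ [ai]) (init := [x]) (by norm_num)
  rw [h]
  have := pvFoldA xs x []
  simpa using this

theorem pvB_eq (x : Int) (xs : List Int) : del_conti_alt (x :: xs) = pvRuns x xs := by
  induction xs generalizing x with
  | nil => simp [del_conti_alt, pvRuns, PySem.List.pyGetD, PySem.List.pyGet?, PySem.List.pyIdx?, PySem.List.slice]
  | cons y rest ih =>
    have hb := ih y
    have hl : PySem.List.pyGetD (x :: y :: rest) (-1) 0 = PySem.List.pyGetD (y :: rest) (-1) 0 := by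
      simp [PySem.List.pyGetD, PySem.List.pyGet?, PySem.List.pyIdx?]
      rfl
    simp only [del_conti_alt, PySem.List.slice_from_one, List.tail_cons] at hb ⊢
    rw [List.zip_cons_cons, List.filter_cons, hl]
    rw [pvRuns]
    by_cases h : 4 ≤ |y - x|
    · simp only [h, decide_true, if_true, List.map_cons, List.cons_append, hb]
    · simp only [h, decide_false, Bool.false_eq_true, if_false, hb]

-- ===== VERDICT (by name: the statement is the Claim_ definition above) =====
theorem del_conti_spec : Claim_equal_del_conti := by
  intro arr_set _ hpre
  unfold Spec_del_conti
  match arr_set, hpre with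
  | x :: xs, _ => rw [pvA_eq, pvB_eq]
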